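-- pv_equiv track=rewrite | github.com/pgreenland/SoapyPlutoSDR | support/test_timestamp_loopback.py | extract_timestamp
-- ===== SOURCE A (Python) =====
-- import enum
--
-- class States(enum.Enum):
--     HEADER = enum.auto()
--     VALUE = enum.auto()
--     FOOTER = enum.auto()
--     DONE = enum.auto()
--
-- def extract_timestamp(rx_buff):
--     """Extract timestamp from rx buffer, embedded in tx butter"""
--
--     # Reset extracted timestamp and offset of timestamp within buffer
--     extracted_value = 0
--     extracted_offset = 0
--
--     # Search for timestamp in current buffer
--     state = States.HEADER
--     count = 0
--     for i in range(len(rx_buff)):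
--         if state == States.HEADER:
--             # Looking for header words
--             if rx_buff[i] == 0xffff:
--                 # Found word
--                 count += 1
--             else:
--                 # Reset count
--                 count = 0
--
--             if count == 2:
--                 # Found both words, advance state
--                 state = States.VALUE
--                 count = 0
--
--         elif state == States.VALUE:
--             # Extract value
--             extracted_value = (int(rx_buff[i]) << 56 | (extracted_value >> 8))
--             if count == 0:
--                 # Capture word offset of data
--                 extracted_offset = i
--
--             count += 1
--
--             if count == 8:
--                 # Found all value bytes, advance state
--                 state = States.FOOTER
--                 count = 0
--
--         elif state == States.FOOTER:
--             # Looking for footer words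
--             if rx_buff[i] == 0xffff:
--                 # Found word
--                 count += 1
--             else:
--                 # Uh oh, shouldn't happen, too lazy to handle
--                 break
--
--             if count == 2:
--                 # Found both words, all done
--                 state = States.DONE
--                 break
--
--     if state != States.DONE:
--         # Failed to found timestamp in input buffer
--         return (None, None)
--
--     # Return timestamp and word offset
--     return (extracted_value, extracted_offset)
-- ===== SOURCE B (Python) =====
-- from functools import reduce
--
-- def extract_timestamp(rx_buff):
--     """Extract timestamp from rx buffer, embedded in tx butter"""
--     # First index i >= 1 where rx_buff[i-1] and rx_buff[i] are both header words
--     i = next((k for k in range(1, len(rx_buff))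
--               if rx_buff[k] == 0xffff and rx_buff[k - 1] == 0xffff), None)
--     if i is None:
--         return (None, None)
--     offset = i + 1
--     if offset + 10 > len(rx_buff):
--         # value words or footer words run off the end of the buffer
--         return (None, None)
--     value = reduce(lambda acc, w: (int(w) << 56) | (acc >> 8),
--                    rx_buff[offset:offset + 8], 0)
--     if rx_buff[offset + 8] == 0xffff and rx_buff[offset + 9] == 0xffff:
--         return (value, offset)
--     return (None, None)
-- ===== Notes on version B (the rewrite author's own statement) =====
-- stated objective: simpler
-- what changed: Replaces A's four-state state machine with mutable count/state bookkeeping by a direct decomposition: find the first adjacent 0xffff header pair, bounds-check, fold the eight value words with functools.reduce, and check the two footer words.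
import Mathlib
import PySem

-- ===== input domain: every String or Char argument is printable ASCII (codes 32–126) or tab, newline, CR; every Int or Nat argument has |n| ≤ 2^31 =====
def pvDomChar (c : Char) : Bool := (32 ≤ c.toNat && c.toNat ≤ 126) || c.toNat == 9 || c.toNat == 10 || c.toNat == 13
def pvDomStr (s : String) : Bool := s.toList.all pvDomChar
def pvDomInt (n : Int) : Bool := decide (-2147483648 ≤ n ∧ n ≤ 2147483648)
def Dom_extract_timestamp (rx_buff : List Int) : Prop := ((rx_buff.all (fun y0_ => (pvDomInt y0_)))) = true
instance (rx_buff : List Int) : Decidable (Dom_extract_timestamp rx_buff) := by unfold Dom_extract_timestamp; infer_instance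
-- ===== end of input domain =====

-- B replaces A's four-state state machine with a direct header-pair search, a slice fold
-- and footer checks (objective: simpler decomposition, same single-pass cost).


-- ===== PORT A =====
-- the state machine's States enum (DONE is reached by returning directly)
inductive AState | header | value | footer | done
deriving DecidableEq, Repr

-- acc = (int(word) << 56) | (acc >> 8)  — Python-exact on Int via PySem.Int.bor and <<< / >>>
def tsStep (acc w : Int) : Int := PySem.Int.bor (w <<< (56:Nat)) (acc >>> (8:Nat))

-- A's for-loop: iterates the buffer elements, i tracks the Python index; `break`s return directly
def loopA : List Int → Nat → AState → Nat → Int → Int → AState × Int × Int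
  | [], _, st, _, v, off => (st, v, off)
  | x :: rest, i, st, count, v, off =>
    match st with
    | .header =>
      let count' := if x = 0xffff then count + 1 else 0
      if count' = 2 then loopA rest (i + 1) .value 0 v off
      else loopA rest (i + 1) .header count' v off
    | .value =>
      let v' := tsStep v x
      let off' := if count = 0 then (i : Int) else off
      if count + 1 = 8 then loopA rest (i + 1) .footer 0 v' off'
      else loopA rest (i + 1) .value (count + 1) v' off'
    | .footer =>
      if x = 0xffff then
        if count + 1 = 2 then (.done, v, off)        -- break with state DONE
        else loopA rest (i + 1) .footer (count + 1) v off
      else (.footer, v, off)                          -- break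
    | .done => (.done, v, off)

def extract_timestamp (rx_buff : List Int) : Option Int × Option Int :=
  let r := loopA rx_buff 0 .header 0 0 0
  if r.1 = .done then (some r.2.1, some r.2.2) else (none, none)

-- ===== PORT B =====
-- next((k for k in range(1, len) if rx[k] == 0xffff and rx[k-1] == 0xffff), None):
-- scan adjacent pairs; k is the index of the second element of the pair
def findPair : List Int → Nat → Option Nat
  | x :: y :: rest, k => if x = 0xffff ∧ y = 0xffff then some k else findPair (y :: rest) (k + 1)
  | _, _ => none

def extract_timestamp_alt (rx_buff : List Int) : Option Int × Option Int :=
  match findPair rx_buff 1 with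
  | none => (none, none)
  | some i =>
    let offset := i + 1
    if offset + 10 > rx_buff.length then (none, none)
    else
      -- rx_buff[offset:offset+8] with non-negative in-range bounds = (drop offset).take 8
      let value := ((rx_buff.drop offset).take 8).foldl tsStep 0
      if rx_buff[offset + 8]? = some 0xffff ∧ rx_buff[offset + 9]? = some 0xffff then
        (some value, some (offset : Int))
      else (none, none)

-- ===== PRECONDITION & SPEC =====
def Spec_extract_timestamp (rx_buff : List Int) (out : Option Int × Option Int) : Prop := out = extract_timestamp_alt rx_buff
instance (rx_buff : List Int) (out : Option Int × Option Int) : Decidable (Spec_extract_timestamp rx_buff out) := by unfold Spec_extract_timestamp; infer_instance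

-- ===== CLAIM (what is proved, stated in full; the proofs are below) =====
def Claim_equal_extract_timestamp : Prop := ∀ (rx_buff : List Int), Dom_extract_timestamp rx_buff → Spec_extract_timestamp rx_buff (extract_timestamp rx_buff)

-- ===== LEMMAS AND PROOFS =====

-- project a final machine state to the function's result
def outOf (r : AState × Int × Int) : Option Int × Option Int :=
  if r.1 = .done then (some r.2.1, some r.2.2) else (none, none)

-- proof-side: findPair that also returns the remainder list after the pair
def findPairRem : List Int → Nat → Option (Nat × List Int)
  | x :: y :: rest, k => if x = 0xffff ∧ y = 0xffff then some (k, rest) else findPairRem (y :: rest) (k + 1)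
  | _, _ => none

theorem findPair_eq_rem (l : List Int) (k : Nat) :
    findPair l k = (findPairRem l k).map Prod.fst := by
  induction l generalizing k with
  | nil => rfl
  | cons x t ih =>
    cases t with
    | nil => rfl
    | cons y rest =>
      simp only [findPair, findPairRem]
      split_ifs with h
      · rfl
      · exact ih (k + 1)

theorem findPairRem_drop (l : List Int) (k p : Nat) (rem : List Int)
    (h : findPairRem l k = some (p, rem)) : k ≤ p ∧ rem = l.drop (p + 2 - k) := by
  induction l generalizing k with
  | nil => simp [findPairRem] at h
  | cons x t ih =>
    cases t with
    | nil => simp [findPairRem] at h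
    | cons y rest =>
      simp only [findPairRem] at h
      split_ifs at h with hx
      · cases h
        exact ⟨Nat.le_refl _, by simp⟩
      · obtain ⟨hk, hrem⟩ := ih (k + 1) h
        refine ⟨by omega, ?_⟩
        rw [hrem]
        have : p + 2 - k = (p + 2 - (k + 1)) + 1 := by omega
        rw [this]
        rfl

-- footer phase from count 0: DONE iff the next two words are both 0xffff
theorem footer_phase (l : List Int) (j : Nat) (v off : Int) :
    outOf (loopA l j .footer 0 v off) =
      if l[0]? = some 0xffff ∧ l[1]? = some 0xffff then (some v, some off) else (none, none) := by
  match l with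
  | [] => simp [loopA, outOf]
  | [x] =>
    by_cases hx : x = (0xffff : Int) <;> simp [loopA, hx, outOf]
  | x :: y :: rest =>
    by_cases hx : x = (0xffff : Int)
    · by_cases hy : y = (0xffff : Int) <;> simp [loopA, hx, hy, outOf]
    · simp [loopA, hx, outOf]

-- value phase: with n words left to read (count = 8 - n), the machine reads n words into the
-- accumulator, then requires words n and n+1 of the remainder to be footer words
theorem value_phase (n : Nat) (h1 : 1 ≤ n) (h8 : n ≤ 8) :
    ∀ (l : List Int) (i : Nat) (v off : Int), ∀ c : Nat, c = 8 - n →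
    outOf (loopA l i .value c v off) =
      if l[n]? = some 0xffff ∧ l[n + 1]? = some 0xffff then
        (some ((l.take n).foldl tsStep v), some (if c = 0 then (i : Int) else off))
      else (none, none) := by
  induction n with
  | zero => omega
  | succ m ih =>
    intro l i v off c hc
    cases l with
    | nil => simp [loopA, outOf]
    | cons x rest =>
      by_cases hm : m = 0
      · -- n = 1, c = 7: last value word, then footer phase
        subst hm
        have hc7 : c = 7 := by omega
        subst hc7
        have step : loopA (x :: rest) i .value 7 v off
            = loopA rest (i + 1) .footer 0 (tsStep v x) off := by
          simp [loopA]
        rw [step, footer_phase]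
        simp [List.foldl]
      · -- n = m+1 ≥ 2, c = 8 - (m+1) ≤ 6: read one word, recurse
        have hcne : c + 1 ≠ 8 := by omega
        simp only [loopA, if_neg hcne]
        rw [ih (by omega) (by omega) rest (i + 1) (tsStep v x) (if c = 0 then (i : Int) else off) (c + 1) (by omega)]
        have hc1 : ¬ (c + 1 = 0) := by omega
        simp

-- header phase from count 0: scan for the first adjacent header pair, then enter the value phase
theorem header_phase (l : List Int) (i : Nat) (v off : Int) :
    outOf (loopA l i .header 0 v off) =
      match findPairRem l (i + 1) with
      | none => (none, none)
      | some (p, rem) => outOf (loopA rem (p + 1) .value 0 v off) := by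
  induction l generalizing i with
  | nil => simp [loopA, findPairRem, outOf]
  | cons x t ih =>
    cases t with
    | nil =>
      by_cases hx : x = (0xffff : Int) <;>
        simp [loopA, findPairRem, hx, outOf]
    | cons y rest =>
      by_cases hx : x = (0xffff : Int)
      · by_cases hy : y = (0xffff : Int)
        · -- pair found: enter value phase on rest
          simp [loopA, findPairRem, hx, hy]
        · -- x matched, y did not: count resets; same as restarting at y
          have step : loopA (x :: y :: rest) i .header 0 v off = loopA rest (i + 2) .header 0 v off := by
            simp [loopA, hx, hy]
          have step' : loopA (y :: rest) (i + 1) .header 0 v off = loopA rest (i + 2) .header 0 v off := by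
            simp [loopA, hy]
          rw [step, ← step', ih (i + 1)]
          simp [findPairRem, hx, hy]
      · -- x did not match: continue with count 0
        have step : loopA (x :: y :: rest) i .header 0 v off = loopA (y :: rest) (i + 1) .header 0 v off := by
          simp [loopA, hx]
        rw [step, ih (i + 1)]
        by_cases hy : y = (0xffff : Int) <;> simp [findPairRem, hx, hy]

-- ===== VERDICT (by name: the statement is the Claim_ definition above) =====
theorem extract_timestamp_spec : Claim_equal_extract_timestamp := by
  intro rx _
  unfold Spec_extract_timestamp extract_timestamp extract_timestamp_alt
  show outOf (loopA rx 0 .header 0 0 0) = _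
  rw [header_phase rx 0 0 0, findPair_eq_rem]
  cases hfp : findPairRem rx 1 with
  | none => simp
  | some pr =>
    obtain ⟨p, rem⟩ := pr
    obtain ⟨hp1, hrem⟩ := findPairRem_drop rx 1 p rem hfp
    have e21 : p + 2 - 1 = p + 1 := by omega
    have hdrop : rem = rx.drop (p + 1) := by rw [hrem, e21]
    simp only [Option.map_some]
    rw [value_phase 8 (by omega) (by omega) rem (p + 1) 0 0 0 rfl]
    have h8 : rem[8]? = rx[p + 1 + 8]? := by rw [hdrop, List.getElem?_drop]
    have h9 : rem[9]? = rx[p + 1 + 9]? := by rw [hdrop, List.getElem?_drop]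
    by_cases hlen : p + 1 + 10 > rx.length
    · -- buffer too short: word p+10 does not exist, both sides fail
      have : rx[p + 1 + 9]? = none := by
        rw [List.getElem?_eq_none_iff]; omega
      simp [h9, this, hlen]
    · have hlen' : ¬ (p + 1 + 10 > rx.length) := hlen
      simp only [if_neg hlen']
      rw [h8, h9, hdrop]
      by_cases hcond : rx[p + 1 + 8]? = some (0xffff : Int) ∧ rx[p + 1 + 9]? = some (0xffff : Int)
      · simp [hcond]
      · simp [hcond]
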